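-- pv_equiv track=rewrite | github.com/sheshbazzarr/CompetitiveProgramming-2024 | 1208-get-equal-substrings-within-budget/1208-get-equal-substrings-within-budget.py | equalSubstring
-- ===== SOURCE A (Python) =====
-- def equalSubstring(s: str, t: str, maxCost: int) -> int:
--     n = len(s)
--     cost = [abs(ord(s[i]) - ord(t[i])) for i in range(n)]
--
--     # Create prefix sum array
--     prefix_sum = [0] * (n + 1)
--     for i in range(n):
--         prefix_sum[i + 1] = prefix_sum[i] + cost[i]
--
--     def canMakeSubstring(length):
--         for i in range(n - length + 1):
--             totalCost = prefix_sum[i + length] - prefix_sum[i]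
--             if totalCost <= maxCost:
--                 return True
--         return False
--
--     # Binary search for maximum length
--     left, right = 0, n
--     while left < right:
--         mid = (left + right + 1) // 2
--         if canMakeSubstring(mid):
--             left = mid
--         else:
--             right = mid - 1
--
--     return left
-- ===== SOURCE B (Python) =====
-- def equalSubstring(s: str, t: str, maxCost: int) -> int:
--     total = 0
--     left = 0
--     for right in range(len(s)):
--         total += abs(ord(s[right]) - ord(t[right]))
--         if total > maxCost:
--             total -= abs(ord(s[left]) - ord(t[left]))
--             left += 1
--     return len(s) - left
-- ===== Notes on version B (the rewrite author's own statement) =====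
-- stated objective: faster
-- what changed: Replaced A's prefix-sum array plus binary search over candidate lengths (each probe scanning all windows) with a single-pass non-shrinking sliding window that maintains the running window cost.
import Mathlib
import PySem

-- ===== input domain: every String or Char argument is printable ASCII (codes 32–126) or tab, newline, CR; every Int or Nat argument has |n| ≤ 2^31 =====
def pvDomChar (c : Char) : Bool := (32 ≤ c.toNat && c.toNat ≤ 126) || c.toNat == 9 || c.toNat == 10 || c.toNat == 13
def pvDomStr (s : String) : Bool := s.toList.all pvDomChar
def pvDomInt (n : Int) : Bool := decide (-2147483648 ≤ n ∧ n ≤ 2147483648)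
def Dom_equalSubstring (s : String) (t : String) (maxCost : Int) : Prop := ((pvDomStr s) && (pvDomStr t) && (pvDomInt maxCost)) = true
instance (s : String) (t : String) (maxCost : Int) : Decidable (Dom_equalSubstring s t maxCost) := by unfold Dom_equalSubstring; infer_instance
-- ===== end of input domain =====

-- B replaces A's prefix-sum + binary-search (O(n log n)) by a one-pass non-shrinking
-- sliding window (O(n)); same return value whenever len(t) >= len(s) (A and B both raise otherwise).


-- ===== PORT A =====
-- abs(ord(s[i]) - ord(t[i])); the .getD is dead under Pre_ (index in range)
def costAt (cs ct : List Char) (i : Nat) : Int :=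
  |((((PySem.List.pyGet? cs (i : Int)).getD ' ').toNat : Int)) -
   ((((PySem.List.pyGet? ct (i : Int)).getD ' ').toNat : Int))|

-- while left < right: binary search loop of A
def bsLoop (canMake : Nat → Bool) (left right : Nat) : Nat :=
  if _h : left < right then
    let mid := (left + right + 1) / 2
    if canMake mid then bsLoop canMake mid right
    else bsLoop canMake left (mid - 1)
  else left
termination_by right - left
decreasing_by all_goals omega

def equalSubstring (s : String) (t : String) (maxCost : Int) : Int :=
  let cs := s.toList
  let ct := t.toList
  let n := cs.length
  let cost := (List.range n).map (fun i => costAt cs ct i)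
  let ps := cost.foldl (fun ps c => ps ++ [ps.getLastD 0 + c]) [0]
  let canMake : Nat → Bool := fun length =>
    (List.range (n - length + 1)).any (fun i =>
      decide (ps.getD (i + length) 0 - ps.getD i 0 ≤ maxCost))
  ((bsLoop canMake 0 n : Nat) : Int)

-- ===== PORT B =====
def equalSubstring_alt (s : String) (t : String) (maxCost : Int) : Int :=
  let cs := s.toList
  let ct := t.toList
  let st := (List.range cs.length).foldl
    (fun (st : Int × Nat) r =>
      let total := st.1 + costAt cs ct r
      if maxCost < total then (total - costAt cs ct st.2, st.2 + 1)
      else (total, st.2))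
    (0, 0)
  (cs.length : Int) - (st.2 : Int)

-- ===== PRECONDITION & SPEC =====
-- Pre_ excludes len(s) > len(t), on which Python A raises IndexError (t[i]); B raises there too.
def Pre_equalSubstring (s : String) (t : String) (_maxCost : Int) : Prop := s.length ≤ t.length
instance (s : String) (t : String) (maxCost : Int) : Decidable (Pre_equalSubstring s t maxCost) := by
  unfold Pre_equalSubstring; infer_instance

def pvWitness_equalSubstring : String × String × Int := ("abcd", "bcdf", 3)

def Spec_equalSubstring (s : String) (t : String) (maxCost : Int) (out : Int) : Prop := out = equalSubstring_alt s t maxCost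
instance (s : String) (t : String) (maxCost : Int) (out : Int) : Decidable (Spec_equalSubstring s t maxCost out) := by unfold Spec_equalSubstring; infer_instance

-- ===== CLAIM (what is proved, stated in full; the proofs are below) =====
def Claim_equal_equalSubstring : Prop := ∀ (s : String) (t : String) (maxCost : Int), Dom_equalSubstring s t maxCost → Pre_equalSubstring s t maxCost → Spec_equalSubstring s t maxCost (equalSubstring s t maxCost)

-- ===== LEMMAS AND PROOFS =====

-- prefix sums of the cost sequence
def Pfx (cs ct : List Char) : Nat → Int
  | 0 => 0
  | k + 1 => Pfx cs ct k + costAt cs ct k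

-- there is a window of length L inside the first n positions with cost ≤ mc
def Feas (cs ct : List Char) (mc : Int) (n L : Nat) : Prop :=
  ∃ i, i + L ≤ n ∧ Pfx cs ct (i + L) - Pfx cs ct i ≤ mc

-- B (and A) both return the greatest feasible length (0 is always allowed)
def Good (cs ct : List Char) (mc : Int) (n B : Nat) : Prop :=
  B ≤ n ∧ (B = 0 ∨ Feas cs ct mc n B) ∧ ∀ L, L ≤ n → B < L → ¬ Feas cs ct mc n L

lemma costAt_nonneg (cs ct : List Char) (i : Nat) : 0 ≤ costAt cs ct i := abs_nonneg _

lemma Pfx_mono (cs ct : List Char) {j k : Nat} (h : j ≤ k) : Pfx cs ct j ≤ Pfx cs ct k := by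
  induction k with
  | zero => simp_all
  | succ k ih =>
    rcases Nat.lt_or_ge j (k + 1) with h' | h'
    · have := ih (by omega)
      have := costAt_nonneg cs ct k
      simp only [Pfx]; omega
    · have : j = k + 1 := by omega
      simp [this]

lemma Feas_anti (cs ct : List Char) (mc : Int) (n : Nat) {L L' : Nat} (h : L ≤ L')
    (hf : Feas cs ct mc n L') : Feas cs ct mc n L := by
  obtain ⟨i, hi, hw⟩ := hf
  refine ⟨i, by omega, ?_⟩
  have := Pfx_mono cs ct (j := i + L) (k := i + L') (by omega)
  omega

lemma Good_unique (cs ct : List Char) (mc : Int) (n : Nat) {B1 B2 : Nat}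
    (h1 : Good cs ct mc n B1) (h2 : Good cs ct mc n B2) : B1 = B2 := by
  obtain ⟨hb1, hd1, hm1⟩ := h1
  obtain ⟨hb2, hd2, hm2⟩ := h2
  rcases Nat.lt_trichotomy B1 B2 with h | h | h
  · exact absurd (hd2.resolve_left (by omega)) (hm1 B2 hb2 h)
  · exact h
  · exact absurd (hd1.resolve_left (by omega)) (hm2 B1 hb1 h)

-- the prefix-sum list A builds is the map of Pfx over range (n+1)
lemma prefix_list_eq (cs ct : List Char) (n : Nat) :
    ((List.range n).map (fun i => costAt cs ct i)).foldl
      (fun ps c => ps ++ [ps.getLastD 0 + c]) [0] =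
    (List.range (n + 1)).map (Pfx cs ct) := by
  induction n with
  | zero => simp [Pfx]
  | succ n ih =>
    have hstep : (List.range (n + 1)).map (fun i => costAt cs ct i) =
        (List.range n).map (fun i => costAt cs ct i) ++ [costAt cs ct n] := by
      rw [List.range_succ, List.map_append]; rfl
    rw [hstep, List.foldl_append, ih]
    have hlast : ((List.range (n + 1)).map (Pfx cs ct)).getLastD 0 = Pfx cs ct n := by
      rw [List.range_succ, List.map_append]
      exact List.getLastD_concat
    simp only [List.foldl_cons, List.foldl_nil, hlast]
    rw [List.range_succ (n := n + 1), List.map_append]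
    simp [Pfx]

lemma getD_map_range {f : Nat → Int} {m k : Nat} (h : k < m) :
    ((List.range m).map f).getD k 0 = f k := by
  simp [List.getD, h]

-- A's canMakeSubstring decides feasibility, for lengths ≤ n
lemma canMake_iff (cs ct : List Char) (mc : Int) (n L : Nat) (hL : L ≤ n) :
    ((List.range (n - L + 1)).any (fun i =>
      decide (((List.range (n + 1)).map (Pfx cs ct)).getD (i + L) 0 -
              ((List.range (n + 1)).map (Pfx cs ct)).getD i 0 ≤ mc)) = true)
    ↔ Feas cs ct mc n L := by
  rw [List.any_eq_true]
  constructor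
  · rintro ⟨i, hi, hdec⟩
    rw [List.mem_range] at hi
    rw [getD_map_range (by omega), getD_map_range (by omega)] at hdec
    exact ⟨i, by omega, by simpa using hdec⟩
  · rintro ⟨i, hi, hw⟩
    refine ⟨i, List.mem_range.mpr (by omega), ?_⟩
    rw [getD_map_range (by omega), getD_map_range (by omega)]
    simpa using hw

-- the binary search returns the greatest feasible length
lemma bsLoop_good (cs ct : List Char) (mc : Int) (n : Nat) (cm : Nat → Bool)
    (hcm : ∀ L, L ≤ n → (cm L = true ↔ Feas cs ct mc n L)) :
    ∀ d left right, right - left ≤ d → left ≤ right → right ≤ n →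
      (left = 0 ∨ Feas cs ct mc n left) →
      (∀ L, L ≤ n → right < L → ¬ Feas cs ct mc n L) →
      Good cs ct mc n (bsLoop cm left right) := by
  intro d
  induction d with
  | zero =>
    intro left right hd hlr hrn hdisj hmax
    have : left = right := by omega
    rw [bsLoop]
    simp only [this, lt_irrefl, dite_false]
    exact ⟨by omega, by simpa [this] using hdisj, by simpa [this] using hmax⟩
  | succ d ih =>
    intro left right hd hlr hrn hdisj hmax
    rw [bsLoop]
    by_cases h : left < right
    · simp only [h, dite_true]
      set mid := (left + right + 1) / 2 with hmid
      have hmid1 : left < mid ∧ mid ≤ right := by constructor <;> omega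
      by_cases hc : cm mid = true
      · simp only [hc, if_true]
        exact ih mid right (by omega) (by omega) hrn
          (Or.inr ((hcm mid (by omega)).mp hc)) hmax
      · simp only [hc]
        refine ih left (mid - 1) (by omega) (by omega) (by omega) hdisj ?_
        intro L hLn hL hF
        rcases Nat.lt_or_ge right L with h' | h'
        · exact hmax L hLn h' hF
        · exact hc ((hcm mid (by omega)).mpr (Feas_anti cs ct mc n (by omega) hF))
    · simp only [h, dite_false]
      have : left = right := by omega
      exact ⟨by omega, hdisj, by simpa [this] using hmax⟩

-- invariant of B's sliding window after the first r steps
lemma slide_inv (cs ct : List Char) (mc : Int) :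
    ∀ r, (((List.range r).foldl
      (fun (st : Int × Nat) j =>
        let total := st.1 + costAt cs ct j
        if mc < total then (total - costAt cs ct st.2, st.2 + 1)
        else (total, st.2)) (0, 0)).2 ≤ r) ∧
      (((List.range r).foldl
      (fun (st : Int × Nat) j =>
        let total := st.1 + costAt cs ct j
        if mc < total then (total - costAt cs ct st.2, st.2 + 1)
        else (total, st.2)) (0, 0)).1 =
        Pfx cs ct r - Pfx cs ct (((List.range r).foldl
      (fun (st : Int × Nat) j =>
        let total := st.1 + costAt cs ct j
        if mc < total then (total - costAt cs ct st.2, st.2 + 1)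
        else (total, st.2)) (0, 0)).2)) ∧
      Good cs ct mc r (r - (((List.range r).foldl
      (fun (st : Int × Nat) j =>
        let total := st.1 + costAt cs ct j
        if mc < total then (total - costAt cs ct st.2, st.2 + 1)
        else (total, st.2)) (0, 0)).2)) := by
  intro r
  induction r with
  | zero =>
    refine ⟨by simp, by simp [Pfx], by simp, Or.inl rfl, ?_⟩
    intro L hL hL'
    omega
  | succ r ih =>
    rw [List.range_succ, List.foldl_append]
    obtain ⟨hl, ht, hBr, hdisj, hmax⟩ := ih
    set st := (List.range r).foldl
      (fun (st : Int × Nat) j =>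
        let total := st.1 + costAt cs ct j
        if mc < total then (total - costAt cs ct st.2, st.2 + 1)
        else (total, st.2)) (0, 0) with hst
    simp only [List.foldl_cons, List.foldl_nil]
    by_cases hc : mc < st.1 + costAt cs ct r
    · -- shrink: left moves to st.2 + 1
      simp only [hc, if_true]
      have heq : r + 1 - (st.2 + 1) = r - st.2 := by omega
      have e1 : Pfx cs ct (r + 1) = Pfx cs ct r + costAt cs ct r := rfl
      have e2 : Pfx cs ct (st.2 + 1) = Pfx cs ct st.2 + costAt cs ct st.2 := rfl
      refine ⟨by omega, by rw [ht, e1, e2]; ring, by omega, ?_, ?_⟩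
      · -- new size equals old size r - st.2
        rw [heq]
        rcases hdisj with h | h
        · exact Or.inl h
        · obtain ⟨i, hi, hw⟩ := h
          exact Or.inr ⟨i, by omega, hw⟩
      · intro L hL hL' hF
        rw [heq] at hL'
        obtain ⟨i, hi, hw⟩ := hF
        rcases Nat.lt_or_ge (i + L) (r + 1) with h' | h'
        · exact hmax L (by omega) (by omega) ⟨i, by omega, hw⟩
        · -- window ends at r+1
          have hiL : i + L = r + 1 := by omega
          rcases Nat.eq_or_lt_of_le hL' with hLe | hLl
          · -- L = r - st.2 + 1, so i = st.2 : this is exactly the current window, infeasible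
            have hi2 : i = st.2 := by omega
            have h2 : st.2 + L = r + 1 := by omega
            have hPv : Pfx cs ct (r + 1) - Pfx cs ct st.2 = st.1 + costAt cs ct r := by
              rw [ht, e1]; ring
            rw [hi2, h2, hPv] at hw
            omega
          · -- L - 1 still exceeds old best, subwindow ending at r is feasible
            have hsub : Feas cs ct mc r (L - 1) := by
              refine ⟨i, by omega, ?_⟩
              have h1 : i + (L - 1) = r := by omega
              have := costAt_nonneg cs ct r
              have hPr : Pfx cs ct (r + 1) = Pfx cs ct r + costAt cs ct r := rfl
              rw [h1]
              rw [hiL, hPr] at hw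
              omega
            exact hmax (L - 1) (by omega) (by omega) hsub
    · -- keep: window grows, current window feasible
      simp only [hc, if_false]
      rw [not_lt] at hc
      refine ⟨by omega, by simp [Pfx, ht]; ring, by omega, ?_, ?_⟩
      · refine Or.inr ⟨st.2, by omega, ?_⟩
        have : Pfx cs ct (st.2 + (r + 1 - st.2)) = Pfx cs ct (r + 1) := by
          congr 1; omega
        rw [this]
        have : Pfx cs ct (r + 1) = Pfx cs ct r + costAt cs ct r := by simp [Pfx]
        omega
      · intro L hL hL' hF
        obtain ⟨i, hi, hw⟩ := hF
        rcases Nat.lt_or_ge (i + L) (r + 1) with h' | h'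
        · exact hmax L (by omega) (by omega) ⟨i, by omega, hw⟩
        · have hiL : i + L = r + 1 := by omega
          have hsub : Feas cs ct mc r (L - 1) := by
            refine ⟨i, by omega, ?_⟩
            have h1 : i + (L - 1) = r := by omega
            have := costAt_nonneg cs ct r
            have hPr : Pfx cs ct (r + 1) = Pfx cs ct r + costAt cs ct r := rfl
            rw [h1]
            rw [hiL, hPr] at hw
            omega
          exact hmax (L - 1) (by omega) (by omega) hsub

lemma equalSubstring_good (s t : String) (mc : Int) :
    Good s.toList t.toList mc s.toList.length (equalSubstring s t mc).toNat ∧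
      0 ≤ equalSubstring s t mc := by
  unfold equalSubstring
  simp only []
  rw [prefix_list_eq]
  refine ⟨?_, Int.natCast_nonneg _⟩
  rw [Int.toNat_natCast]
  exact bsLoop_good s.toList t.toList mc s.toList.length _
    (fun L hL => canMake_iff s.toList t.toList mc s.toList.length L hL)
    s.toList.length 0 s.toList.length (by omega) (by omega) (by omega)
    (Or.inl rfl) (fun L hLn hL _ => absurd hLn (by omega))

lemma equalSubstring_alt_good (s t : String) (mc : Int) :
    Good s.toList t.toList mc s.toList.length (equalSubstring_alt s t mc).toNat ∧
      0 ≤ equalSubstring_alt s t mc := by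
  obtain ⟨hl, ht, hG⟩ := slide_inv s.toList t.toList mc s.toList.length
  unfold equalSubstring_alt
  simp only []
  set st := (List.range s.toList.length).foldl
      (fun (st : Int × Nat) j =>
        let total := st.1 + costAt s.toList t.toList j
        if mc < total then (total - costAt s.toList t.toList st.2, st.2 + 1)
        else (total, st.2)) (0, 0) with hst
  refine ⟨?_, by omega⟩
  have h2 : ((s.toList.length : Int) - (st.2 : Int)).toNat = s.toList.length - st.2 := by omega
  rw [h2]
  exact hG

-- ===== VERDICT (by name: the statement is the Claim_ definition above) =====
theorem equalSubstring_spec : Claim_equal_equalSubstring := by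
  intro s t mc _ _
  unfold Spec_equalSubstring
  obtain ⟨hA, hA0⟩ := equalSubstring_good s t mc
  obtain ⟨hB, hB0⟩ := equalSubstring_alt_good s t mc
  have := Good_unique s.toList t.toList mc s.toList.length hA hB
  omega
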